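-- pv_equiv track=rewrite | github.com/aenderson/PPD | master.py | split_indexes
-- ===== SOURCE A (Python) =====
-- def split_indexes(a, n):
--   k, m = divmod(len(a), n)
--   splitted_data = list((a[i*k+min(i, m):(i+1)*k+min(i+1, m)] for i in list(range(n))))
--   count = 0
--   indexes = []
--   for split in splitted_data:
--       indexes.append(str(count) + '-' + str(len(split)+count-1))
--       count += len(split)
--
--   # output will be like: ["0-99", "100-199", "200-299", ...]
--   return indexes
-- ===== SOURCE B (Python) =====
-- def split_indexes(a, n):
--     # Closed-form index ranges: no slicing of the data, no running count.
--     k, m = divmod(len(a), n)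
--     return [f'{i*k + min(i, m)}-{(i+1)*k + min(i+1, m) - 1}' for i in range(n)]
-- ===== Notes on version B (the rewrite author's own statement) =====
-- stated objective: simpler
-- what changed: B never materialises the n slices of the data and drops the running count accumulator: each 'start-end' string is computed in closed form from the index i alone (start = i*k+min(i,m), end = (i+1)*k+min(i+1,m)-1).
import Mathlib
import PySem

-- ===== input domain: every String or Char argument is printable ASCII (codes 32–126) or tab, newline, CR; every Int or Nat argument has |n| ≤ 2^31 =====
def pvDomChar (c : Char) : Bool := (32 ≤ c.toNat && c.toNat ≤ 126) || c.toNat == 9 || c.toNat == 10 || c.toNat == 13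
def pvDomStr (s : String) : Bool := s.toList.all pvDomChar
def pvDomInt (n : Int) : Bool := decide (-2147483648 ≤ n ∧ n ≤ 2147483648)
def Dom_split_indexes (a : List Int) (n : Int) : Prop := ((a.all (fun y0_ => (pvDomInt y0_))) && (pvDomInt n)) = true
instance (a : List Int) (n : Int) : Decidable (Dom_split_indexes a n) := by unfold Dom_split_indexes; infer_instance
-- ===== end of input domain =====

-- B replaces A's data slicing and running-count loop by a closed-form per-index computation.

-- ===== PORT A =====
def split_indexes (a : List Int) (n : Int) : List String :=
  let k : Int := PySem.Int.floordiv (a.length : Int) n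
  let m : Int := PySem.Int.mod (a.length : Int) n
  let splitted_data : List (List Int) :=
    (PySem.List.pyRange 0 n 1).map (fun i =>
      PySem.List.slice a (some (i * k + min i m)) (some ((i + 1) * k + min (i + 1) m)))
  let st : Int × List String :=
    splitted_data.foldl (fun st split =>
      (st.1 + (split.length : Int),
       st.2 ++ [PySem.Int.toStr st.1 ++ "-" ++ PySem.Int.toStr ((split.length : Int) + st.1 - 1)]))
      (0, [])
  st.2

-- ===== PORT B =====
def split_indexes_alt (a : List Int) (n : Int) : List String :=
  let k : Int := PySem.Int.floordiv (a.length : Int) n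
  let m : Int := PySem.Int.mod (a.length : Int) n
  (PySem.List.pyRange 0 n 1).map (fun i =>
    PySem.Int.toStr (i * k + min i m) ++ "-" ++ PySem.Int.toStr ((i + 1) * k + min (i + 1) m - 1))

-- ===== PRECONDITION & SPEC =====
-- A performs divmod(len(a), n), which raises ZeroDivisionError when n = 0.
def Pre_split_indexes (a : List Int) (n : Int) : Prop := n ≠ 0
instance (a : List Int) (n : Int) : Decidable (Pre_split_indexes a n) := by
  unfold Pre_split_indexes; infer_instance
def pvWitness_split_indexes : List Int × Int := ([1, 2, 3], 2)
def Spec_split_indexes (a : List Int) (n : Int) (out : List String) : Prop := out = split_indexes_alt a n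
instance (a : List Int) (n : Int) (out : List String) : Decidable (Spec_split_indexes a n out) := by unfold Spec_split_indexes; infer_instance

-- ===== CLAIM (what is proved, stated in full; the proofs are below) =====
def Claim_equal_split_indexes : Prop := ∀ (a : List Int) (n : Int), Dom_split_indexes a n → Pre_split_indexes a n → Spec_split_indexes a n (split_indexes a n)

-- ===== LEMMAS AND PROOFS =====

lemma chunk_len (a : List Int) (s e : Int) (hs : 0 ≤ s) (hse : s ≤ e)
    (heL : e ≤ (a.length : Int)) :
    ((PySem.List.slice a (some s) (some e)).length : Int) = e - s := by
  have he : 0 ≤ e := le_trans hs hse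
  simp only [PySem.List.length_slice, PySem.List.clampIdx, if_neg (not_lt.mpr hs),
    if_neg (not_lt.mpr he)]
  omega

-- invariant of A's appending loop: starting at index i with count = i*k + min i m,
-- the loop emits exactly B's closed-form strings for the indices i, …, n-1
lemma loopA (a : List Int) (k m n : Int) (hk : 0 ≤ k) (hm : 0 ≤ m) (hmn : m ≤ n)
    (hL : n * k + m = (a.length : Int)) :
    ∀ (j : Nat) (i : Int), 0 ≤ i → i + (j : Int) = n → ∀ acc : List String,
      (((PySem.List.pyRange i n 1).map (fun i =>
          PySem.List.slice a (some (i * k + min i m)) (some ((i + 1) * k + min (i + 1) m)))).foldl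
        (fun st split =>
          (st.1 + (split.length : Int),
           st.2 ++ [PySem.Int.toStr st.1 ++ "-" ++ PySem.Int.toStr ((split.length : Int) + st.1 - 1)]))
        (i * k + min i m, acc))
      = (n * k + m,
         acc ++ (PySem.List.pyRange i n 1).map (fun i =>
           PySem.Int.toStr (i * k + min i m) ++ "-" ++ PySem.Int.toStr ((i + 1) * k + min (i + 1) m - 1))) := by
  intro j
  induction j with
  | zero =>
    intro i hi hin acc
    rw [PySem.List.pyRange_one_eq_nil (by omega : n ≤ i)]
    simp only [List.map_nil, List.foldl_nil, List.append_nil]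
    rw [show i = n from by omega, show min n m = m from by omega]
  | succ j ih =>
    intro i hi hin acc
    have hlt : i < n := by omega
    rw [PySem.List.pyRange_one_cons hlt]
    simp only [List.map_cons, List.foldl_cons]
    have hs0 : 0 ≤ i * k + min i m := by
      have := mul_nonneg hi hk; omega
    have hse : i * k + min i m ≤ (i + 1) * k + min (i + 1) m := by
      have h1 : (i + 1) * k = i * k + k := by ring
      omega
    have heL : (i + 1) * k + min (i + 1) m ≤ (a.length : Int) := by
      have h2 : 0 ≤ (n - i - 1) * k := mul_nonneg (by omega) hk
      have h3 : (n - i - 1) * k = n * k - (i + 1) * k := by ring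
      omega
    have hlen := chunk_len a _ _ hs0 hse heL
    rw [hlen]
    have hstep : i * k + min i m + ((i + 1) * k + min (i + 1) m - (i * k + min i m))
        = (i + 1) * k + min (i + 1) m := by ring
    have hstr : (i + 1) * k + min (i + 1) m - (i * k + min i m) + (i * k + min i m) - 1
        = (i + 1) * k + min (i + 1) m - 1 := by ring
    rw [hstep, hstr, ih (i + 1) (by omega) (by omega)]
    simp

theorem split_indexes_spec_aux (a : List Int) (n : Int) (hn : n ≠ 0) :
    split_indexes a n = split_indexes_alt a n := by
  unfold split_indexes split_indexes_alt
  rcases lt_or_gt_of_ne hn with hneg | hpos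
  · rw [PySem.List.pyRange_one_eq_nil (by omega : n ≤ (0 : Int))]
    simp
  · set k : Int := PySem.Int.floordiv (a.length : Int) n with hkdef
    set m : Int := PySem.Int.mod (a.length : Int) n with hmdef
    have hk : 0 ≤ k := by
      rw [hkdef, PySem.Int.floordiv_eq_ediv_of_pos hpos]
      exact Int.ediv_nonneg (by positivity) (by omega)
    have hm : 0 ≤ m := by
      rw [hmdef, PySem.Int.mod_eq_emod_of_pos hpos]
      exact Int.emod_nonneg _ (by omega)
    have hmn : m ≤ n := by
      rw [hmdef, PySem.Int.mod_eq_emod_of_pos hpos]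
      have := Int.emod_lt_of_pos (a.length : Int) hpos
      omega
    have hL : n * k + m = (a.length : Int) := by
      have := PySem.Int.floordiv_mul_add_mod (a.length : Int) n
      rw [hkdef, hmdef]; linarith [this]
    have h0 : (0 : Int) * k + min 0 m = 0 := by
      have : min (0 : Int) m = 0 := by omega
      rw [this]; ring
    have := loopA a k m n hk hm hmn hL n.toNat 0 le_rfl (by omega) []
    rw [h0] at this
    simp only []
    rw [this]
    simp

-- ===== VERDICT (by name: the statement is the Claim_ definition above) =====
theorem split_indexes_spec : Claim_equal_split_indexes := by
  intro a n _ hn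
  exact split_indexes_spec_aux a n hn
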